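-- pv_equiv track=rewrite | github.com/Garrylx/pycharm.lianxi | Lab of SoftWare/LAB11[recursion2]/9.py | join_multiply
-- ===== SOURCE A (Python) =====
-- def join_multiply(l1,l2,fl,fl2=None):
--     if fl2 == None:
--         fl2 = []
--     if len(l2) > 0 and len(l1) > 0:
--         calu = l1[0]
--         fl.append(calu*l2[0])
--         fl2 += [l2[0]]
--         return join_multiply(l1, l2[1:],fl,fl2)
--     else:
--         if len(l1) > 0:
--             calu = l1[0]
--             l1 = l1[1:]
--             l2 = fl2
--             return join_multiply(l1,l2,fl,[])
--         else:
--             return fl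
-- ===== SOURCE B (Python) =====
-- def join_multiply(l1, l2, fl, fl2=None):
--     if not l1:
--         return fl
--     rest = (fl2 if fl2 is not None else []) + l2
--     x = l1[0]
--     for y in l2:
--         fl.append(x * y)
--     for x in l1[1:]:
--         for y in rest:
--             fl.append(x * y)
--     return fl
-- ===== Notes on version B (the rewrite author's own statement) =====
-- stated objective: simpler
-- what changed: Replaces A's recursion, which rebuilds l2 through the fl2 accumulator row by row, with two plain nested loops over l1 and l2 (B ignores fl2 except as the prefix it contributes to rows after the first); equivalence is about the return value — both mutate fl in place, but A also mutates a caller-supplied fl2 while B does not.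
import Mathlib
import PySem

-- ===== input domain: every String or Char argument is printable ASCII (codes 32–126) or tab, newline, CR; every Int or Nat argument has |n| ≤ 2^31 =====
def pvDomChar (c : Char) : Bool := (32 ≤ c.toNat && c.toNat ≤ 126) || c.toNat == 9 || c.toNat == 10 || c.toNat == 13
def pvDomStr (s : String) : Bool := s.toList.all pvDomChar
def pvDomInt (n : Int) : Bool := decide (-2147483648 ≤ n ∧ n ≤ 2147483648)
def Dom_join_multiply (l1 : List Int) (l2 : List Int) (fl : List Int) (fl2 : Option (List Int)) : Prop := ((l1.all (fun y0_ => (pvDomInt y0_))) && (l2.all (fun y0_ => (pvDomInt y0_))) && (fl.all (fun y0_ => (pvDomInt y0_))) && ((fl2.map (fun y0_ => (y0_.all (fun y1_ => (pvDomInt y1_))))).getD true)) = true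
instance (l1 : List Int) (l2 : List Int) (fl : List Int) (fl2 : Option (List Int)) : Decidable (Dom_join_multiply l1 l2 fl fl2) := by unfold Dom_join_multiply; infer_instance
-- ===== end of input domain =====

-- B replaces A's recursion (which rebuilds l2 through the fl2 accumulator) by two plain nested
-- loops; equivalence is about the RETURN value: both Pythons mutate fl in place, A also mutates a
-- caller-supplied fl2 while B does not.

-- ===== PORT A =====
-- literal transliteration of A's recursion; the guards 'len(l2) > 0 and len(l1) > 0' /
-- 'len(l1) > 0' become the structural match on (l1, l2), preserving branch order.
def join_multiply (l1 : List Int) (l2 : List Int) (fl : List Int) (fl2 : Option (List Int)) : List Int :=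
  -- 'if fl2 == None: fl2 = []' is rendered as 'fl2.getD []' at each use
  match l1, l2 with
  | a :: t1, b :: t2 =>
      -- fl.append(l1[0]*l2[0]); fl2 += [l2[0]]; recurse on l2[1:]
      join_multiply (a :: t1) t2 (fl ++ [a * b]) (some (fl2.getD [] ++ [b]))
  | _ :: t1, [] =>
      -- l1 = l1[1:]; l2 = fl2; recurse with fl2 = []
      join_multiply t1 (fl2.getD []) fl (some [])
  | [], _ => fl
termination_by (l1.length, l2.length)

-- ===== PORT B =====
-- literal transliteration of Source B: head row over l2, then nested loops over l1[1:] × rest.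
def join_multiply_alt (l1 : List Int) (l2 : List Int) (fl : List Int) (fl2 : Option (List Int)) : List Int :=
  match l1 with
  | [] => fl
  | x :: t1 =>
      let rest := (fl2.getD []) ++ l2
      let fl1 := l2.foldl (fun acc y => acc ++ [x * y]) fl
      t1.foldl (fun acc x' => rest.foldl (fun acc' y => acc' ++ [x' * y]) acc) fl1

-- ===== PRECONDITION & SPEC =====
def Spec_join_multiply (l1 : List Int) (l2 : List Int) (fl : List Int) (fl2 : Option (List Int)) (out : List Int) : Prop := out = join_multiply_alt l1 l2 fl fl2
instance (l1 : List Int) (l2 : List Int) (fl : List Int) (fl2 : Option (List Int)) (out : List Int) : Decidable (Spec_join_multiply l1 l2 fl fl2 out) := by unfold Spec_join_multiply; infer_instance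

-- ===== CLAIM (what is proved, stated in full; the proofs are below) =====
def Claim_equal_join_multiply : Prop := ∀ (l1 : List Int) (l2 : List Int) (fl : List Int) (fl2 : Option (List Int)), Dom_join_multiply l1 l2 fl fl2 → Spec_join_multiply l1 l2 fl fl2 (join_multiply l1 l2 fl fl2)

-- ===== LEMMAS AND PROOFS =====

-- one inner loop 'for y in l: acc ++= [x*y]' appends the mapped row
theorem foldl_row (l : List Int) (x : Int) (acc : List Int) :
    l.foldl (fun a y => a ++ [x * y]) acc = acc ++ l.map (fun y => x * y) := by
  induction l generalizing acc with
  | nil => simp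
  | cons b t ih => simp [List.foldl, ih, List.append_assoc]

-- A's first phase: consuming one row (a with all of l2) while accumulating l2 into fl2
theorem join_multiply_row (l2 : List Int) (a : Int) (t1 fl : List Int)
    (fl2 : Option (List Int)) :
    join_multiply (a :: t1) l2 fl fl2
      = join_multiply t1 (fl2.getD [] ++ l2) (fl ++ l2.map (fun y => a * y)) (some []) := by
  induction l2 generalizing fl fl2 with
  | nil => rw [join_multiply]; simp
  | cons b t2 ih =>
      rw [join_multiply, ih]
      simp [List.append_assoc]

-- A's outer phase with empty accumulator is B's nested loop
theorem join_multiply_outer (l1 l2 fl : List Int) :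
    join_multiply l1 l2 fl (some [])
      = l1.foldl (fun acc x => l2.foldl (fun acc' y => acc' ++ [x * y]) acc) fl := by
  induction l1 generalizing fl with
  | nil => rw [join_multiply]; rfl
  | cons a t1 ih =>
      rw [join_multiply_row]
      simp only [Option.getD_some, List.nil_append, List.foldl]
      rw [ih, foldl_row]

-- ===== VERDICT (by name: the statement is the Claim_ definition above) =====
theorem join_multiply_spec : Claim_equal_join_multiply := by
  intro l1 l2 fl fl2 _
  unfold Spec_join_multiply
  match l1 with
  | [] => rw [join_multiply]; rfl
  | x :: t1 =>
      rw [join_multiply_row, join_multiply_outer]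
      simp only [join_multiply_alt]
      rw [foldl_row]
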